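-- pv_equiv track=rewrite | github.com/NathanNNguyen/challenges | interview_questions/witness_of_tall_people.py | witnesses
-- ===== SOURCE A (Python) =====
-- def witnesses(heights):
--     r = []
--     count = 1
--     for i in range(len(heights)):
--         for j in heights[count:]:
--             if heights[i] < j:
--                 r.append(i)
--                 break
--         count += 1
--     for i in r[::-1]:
--         heights.pop(i)
--
--     return len(heights)
-- ===== SOURCE B (Python) =====
-- def witnesses(heights):
--     # Single right-to-left pass tracking the running suffix maximum.
--     # Note: unlike A, this does not mutate `heights`; return value only.
--     count = 0
--     best = None
--     for h in reversed(heights):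
--         if best is None or h >= best:
--             count += 1
--             best = h
--     return count
-- ===== Notes on version B (the rewrite author's own statement) =====
-- stated objective: faster
-- what changed: Replaced A's per-index forward scan over the remaining suffix plus a delete pass with a single right-to-left sweep that tracks the running suffix maximum and counts elements >= it (B does not mutate the input list; the equivalence is about the return value).
import Mathlib
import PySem

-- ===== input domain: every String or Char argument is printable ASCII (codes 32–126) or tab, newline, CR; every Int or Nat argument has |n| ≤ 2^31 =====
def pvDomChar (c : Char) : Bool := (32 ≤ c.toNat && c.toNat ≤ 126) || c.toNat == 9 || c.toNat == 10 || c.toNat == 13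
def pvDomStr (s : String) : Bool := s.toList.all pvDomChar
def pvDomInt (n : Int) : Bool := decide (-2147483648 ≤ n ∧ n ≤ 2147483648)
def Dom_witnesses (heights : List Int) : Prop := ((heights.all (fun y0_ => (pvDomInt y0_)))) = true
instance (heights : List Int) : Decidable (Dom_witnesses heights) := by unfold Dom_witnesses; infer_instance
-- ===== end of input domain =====

-- B replaces A's quadratic scan-ahead-and-delete with one right-to-left pass over a
-- running suffix maximum (return value only: A pops from its argument, B does not mutate).

-- ===== PORT A =====
-- step of 'for i in range(len(heights))' carrying (r, count);
-- the inner 'for j in heights[count:]: if heights[i] < j: r.append(i); break'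
-- appends i exactly when some j in the slice exceeds heights[i] (short-circuit any).
def witnessesStepA (heights : List Int) (st : List Int × Int) (i : Int) : List Int × Int :=
  let r := if (PySem.List.slice heights (some st.2) none).any
              (fun j => PySem.List.pyGetD heights i 0 < j) then st.1 ++ [i] else st.1
  (r, st.2 + 1)

-- 'heights.pop(i)' (index is always valid here; none is unreachable)
def witnessesPop (l : List Int) (i : Int) : List Int :=
  ((PySem.List.pop? l i).map Prod.snd).getD l

def witnesses (heights : List Int) : Int :=
  let st := (PySem.List.pyRange 0 (heights.length : Int) 1).foldl (witnessesStepA heights) ([], 1)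
  -- 'for i in r[::-1]: heights.pop(i)' (r[::-1] is r.reverse)
  let final := st.1.reverse.foldl witnessesPop heights
  (final.length : Int)

-- ===== PORT B =====
def witnessesStepB (st : Int × Option Int) (h : Int) : Int × Option Int :=
  match st.2 with
  | none => (st.1 + 1, some h)
  | some best => if best ≤ h then (st.1 + 1, some h) else st

def witnesses_alt (heights : List Int) : Int :=
  (heights.reverse.foldl witnessesStepB (0, none)).1

-- ===== PRECONDITION & SPEC =====
def Spec_witnesses (heights : List Int) (out : Int) : Prop := out = witnesses_alt heights
instance (heights : List Int) (out : Int) : Decidable (Spec_witnesses heights out) := by unfold Spec_witnesses; infer_instance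

-- ===== CLAIM (what is proved, stated in full; the proofs are below) =====
def Claim_equal_witnesses : Prop := ∀ (heights : List Int), Dom_witnesses heights → Spec_witnesses heights (witnesses heights)

-- ===== LEMMAS AND PROOFS =====

-- i is a "bad" index: some later element is strictly greater
def badIdx (heights : List Int) (i : Nat) : Bool :=
  (heights.drop (i+1)).any (fun j => heights.getD i 0 < j)

-- the final value of A's list r
def badList (heights : List Int) : List Int :=
  ((List.range heights.length).filter (badIdx heights)).map (Nat.cast : Nat → Int)

-- count of elements with no strictly greater later element
def gcount : List Int → Nat
  | [] => 0
  | x :: xs => (if xs.all (fun j => j ≤ x) then 1 else 0) + gcount xs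

theorem foldA_inv (heights : List Int) (k : Nat) (hk : k ≤ heights.length) :
    (PySem.List.pyRange 0 (k : Int) 1).foldl (witnessesStepA heights) ([], 1)
      = (((List.range k).filter (badIdx heights)).map (Nat.cast : Nat → Int), (k : Int) + 1) := by
  induction k with
  | zero =>
      rw [PySem.List.pyRange_one_eq_nil (by norm_num)]
      simp
  | succ k ih =>
      have hk' : k ≤ heights.length := Nat.le_of_succ_le hk
      have hcast : ((k + 1 : Nat) : Int) = (k : Int) + 1 := by push_cast; ring
      rw [hcast, PySem.List.pyRange_one_succ_right (by positivity), List.foldl_append,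
        ih hk', List.foldl_cons, List.foldl_nil]
      have hslice : PySem.List.slice heights (some ((k : Int) + 1)) none
          = heights.drop (k + 1) := by
        rw [← hcast, PySem.List.slice_from_natCast]
      have hcond : ((PySem.List.slice heights (some ((k : Int) + 1)) none).any
          (fun j => PySem.List.pyGetD heights (k : Int) 0 < j)) = badIdx heights k := by
        rw [hslice]
        unfold badIdx
        congr 1
        funext j
        rw [PySem.List.pyGetD_natCast]
      simp only [witnessesStepA, hcond, List.range_succ, List.filter_append,
        List.map_append]
      by_cases hb : badIdx heights k = true
      · simp [hb]
      · simp [hb]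

theorem popAll_length (s l : List Int) (hs : s.Pairwise (· > ·))
    (hmem : ∀ i ∈ s, 0 ≤ i ∧ i < (l.length : Int)) :
    (s.foldl witnessesPop l).length = l.length - s.length := by
  induction s generalizing l with
  | nil => simp
  | cons i s ih =>
      obtain ⟨hi0, hilt⟩ := hmem i (List.mem_cons_self ..)
      have hiNat : i.toNat < l.length := by omega
      have hstep : witnessesPop l i = l.eraseIdx i.toNat := by
        have h2 : PySem.List.pop? l i = some (l[i.toNat], l.eraseIdx i.toNat) := by
          have h3 := PySem.List.pop?_natCast l i.toNat hiNat
          rwa [show ((i.toNat : Nat) : Int) = i by omega] at h3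
        simp [witnessesPop, h2]
      have hlen : (l.eraseIdx i.toNat).length = l.length - 1 :=
        List.length_eraseIdx_of_lt hiNat
      have hgt : ∀ j ∈ s, i > j := (List.pairwise_cons.mp hs).1
      have hrec := ih (l.eraseIdx i.toNat) (List.pairwise_cons.mp hs).2 (by
        intro j hj
        obtain ⟨hj0, _⟩ := hmem j (List.mem_cons_of_mem _ hj)
        have := hgt j hj
        refine ⟨hj0, ?_⟩
        rw [hlen]
        omega)
      simp only [List.foldl_cons, hstep, hrec, hlen, List.length_cons]
      omega

theorem gcount_eq (l : List Int) :
    gcount l = (List.range l.length).countP (fun i => !(badIdx l i)) := by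
  induction l with
  | nil => simp [gcount]
  | cons x xs ih =>
      rw [gcount, ih]
      simp only [List.length_cons, List.range_succ_eq_map, List.countP_cons,
        List.countP_map]
      have h0 : (!(badIdx (x :: xs) 0)) = xs.all (fun j => decide (j ≤ x)) := by
        simp only [badIdx, List.drop_succ_cons, List.drop_zero, List.getD_cons_zero]
        rw [Bool.eq_iff_iff]
        simp [not_lt]
      have hmapped : (List.range xs.length).countP
            ((fun i => !(badIdx (x :: xs) i)) ∘ Nat.succ)
          = (List.range xs.length).countP (fun i => !(badIdx xs i)) := by
        apply List.countP_congr
        intro i _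
        simp [Function.comp, badIdx]
      rw [hmapped, h0]
      by_cases hall : xs.all (fun j => decide (j ≤ x)) = true
      · simp [hall]
        omega
      · simp [hall]

theorem witnesses_eq_gcount (heights : List Int) :
    witnesses heights = (gcount heights : Int) := by
  have hpw : (badList heights).reverse.Pairwise (· > ·) := by
    rw [List.pairwise_reverse]
    apply List.Pairwise.map
    · intro a b hab
      exact_mod_cast hab
    · exact List.Pairwise.filter _ (List.pairwise_lt_range)
  have hmem : ∀ i ∈ (badList heights).reverse, 0 ≤ i ∧ i < (heights.length : Int) := by
    intro i hi
    rw [List.mem_reverse, badList, List.mem_map] at hi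
    obtain ⟨m, hm, rfl⟩ := hi
    have := List.mem_range.mp (List.mem_filter.mp hm).1
    constructor <;> omega
  have h1 : witnesses heights
      = (((badList heights).reverse.foldl witnessesPop heights).length : Int) := by
    simp only [witnesses, foldA_inv heights heights.length le_rfl, badList]
  rw [h1, popAll_length (badList heights).reverse heights hpw hmem, List.length_reverse]
  have hlenR : (badList heights).length
      = (List.range heights.length).countP (badIdx heights) := by
    simp [badList, List.countP_eq_length_filter]
  have hcount := List.length_eq_countP_add_countP (badIdx heights)
      (l := List.range heights.length)
  rw [List.length_range] at hcount
  have hpq : (List.range heights.length).countP (fun a => decide ¬(badIdx heights a = true))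
      = (List.range heights.length).countP (fun i => !(badIdx heights i)) := by
    apply List.countP_congr
    intro a _
    simp
  rw [hpq] at hcount
  rw [hlenR, gcount_eq]
  omega

theorem bfold_inv (l : List Int) :
    (l.reverse.foldl witnessesStepB (0, none)).1 = (gcount l : Int) ∧
      (((l.reverse.foldl witnessesStepB (0, none)).2 = none ∧ l = []) ∨
        ∃ M, (l.reverse.foldl witnessesStepB (0, none)).2 = some M ∧ M ∈ l ∧
          ∀ j ∈ l, j ≤ M) := by
  induction l with
  | nil => simp [gcount]
  | cons x xs ih =>
      have hfold : (x :: xs).reverse.foldl witnessesStepB (0, none)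
          = witnessesStepB (xs.reverse.foldl witnessesStepB (0, none)) x := by
        rw [List.reverse_cons, List.foldl_append, List.foldl_cons, List.foldl_nil]
      obtain ⟨ihc, ihm⟩ := ih
      rcases ihm with ⟨hnone, hnil⟩ | ⟨M, hsome, hMmem, hMmax⟩
      · subst hnil
        refine ⟨?_, Or.inr ⟨x, ?_, by simp, by simp⟩⟩
        · rw [hfold]
          simp only [witnessesStepB, hnone]
          rw [ihc]
          simp [gcount]
        · rw [hfold]
          simp only [witnessesStepB, hnone]
      · rw [hfold]
        simp only [witnessesStepB, hsome]
        by_cases hMx : M ≤ x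
        · rw [if_pos hMx]
          refine ⟨?_, Or.inr ⟨x, rfl, List.mem_cons_self .., ?_⟩⟩
          · have hg : (gcount (x :: xs) : Int) = 1 + (gcount xs : Int) := by
              have hall : xs.all (fun j => decide (j ≤ x)) = true := by
                simp only [List.all_eq_true, decide_eq_true_eq]
                intro j hj
                exact le_trans (hMmax j hj) hMx
              simp [gcount, hall]
            rw [hg, ihc]
            ring
          · intro j hj
            rcases List.mem_cons.mp hj with rfl | hj
            · exact le_rfl
            · exact le_trans (hMmax j hj) hMx
        · rw [if_neg hMx]
          refine ⟨?_, Or.inr ⟨M, hsome, List.mem_cons_of_mem _ hMmem, ?_⟩⟩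
          · have hg : (gcount (x :: xs) : Int) = (gcount xs : Int) := by
              have hall : xs.all (fun j => decide (j ≤ x)) = false := by
                simp only [List.all_eq_false]
                exact ⟨M, hMmem, by simpa using hMx⟩
              simp [gcount, hall]
            rw [hg, ihc]
          · intro j hj
            rcases List.mem_cons.mp hj with rfl | hj
            · omega
            · exact hMmax j hj

theorem witnesses_alt_eq_gcount (heights : List Int) :
    witnesses_alt heights = (gcount heights : Int) := by
  exact (bfold_inv heights).1

-- ===== VERDICT (by name: the statement is the Claim_ definition above) =====
theorem witnesses_spec : Claim_equal_witnesses := by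
  intro heights _
  unfold Spec_witnesses
  rw [witnesses_eq_gcount, witnesses_alt_eq_gcount]
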